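-- pv_equiv track=rewrite | github.com/alltheplaces/alltheplaces | locations/spiders/kona_grill.py | parse_days
-- ===== SOURCE A (Python) =====
-- WEEKDAYS = ["Mo", "Tu", "We", "Th", "Fr", "Sa", "Su"]
--
-- def parse_days(days):
--     """Parse day ranges and returns a list of days it represent
--     The following formats are considered:
--       - Single day, e.g. "Mon", "Monday"
--       - Range, e.g. "Mon-Fri", "Tue-Sund", "Sat-Sunday"
--       - Two days, e.g. "Sat & Sun", "Friday & Su"
--
--     Returns a list with the weekdays
--     """
--     parsed_days = []
--
--     # Range
--     # Produce a list of weekdays between two days e.g. su-sa, mo-th, etc.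
--     if "-" in days:
--         d = days.split("-")
--         r = [i.strip()[:2] for i in d]
--         s = WEEKDAYS.index(r[0].title())
--         e = WEEKDAYS.index(r[1].title())
--         if s <= e:
--             return WEEKDAYS[s : e + 1]
--         else:
--             return WEEKDAYS[s:] + WEEKDAYS[: e + 1]
--     # Two days
--     if "&" in days:
--         d = days.split("&")
--         return [i.strip()[:2].title() for i in d]
--     # Single days
--     else:
--         return [days.strip()[:2].title()]
-- ===== SOURCE B (Python) =====
-- WEEKDAYS = ["Mo", "Tu", "We", "Th", "Fr", "Sa", "Su"]
-- _IDX = {d: i for i, d in enumerate(WEEKDAYS)}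
--
--
-- def _abbr(part):
--     return part.strip()[:2].title()
--
--
-- def parse_days(days):
--     if "-" in days:
--         parts = [_abbr(p) for p in days.split("-")]
--         i, e = _IDX[parts[0]], _IDX[parts[1]]
--         out = [WEEKDAYS[i]]
--         while i != e:
--             i = (i + 1) % 7
--             out.append(WEEKDAYS[i])
--         return out
--     if "&" in days:
--         return [_abbr(p) for p in days.split("&")]
--     return [_abbr(days)]
-- ===== Notes on version B (the rewrite author's own statement) =====
-- stated objective: alternative
-- what changed: The range branch resolves start/end via a precomputed name->index dict and emits the days with a single modular-increment loop (i = (i+1) % 7) instead of A's WEEKDAYS.index calls plus dual-slice concatenation for the wraparound case.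
import Mathlib
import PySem

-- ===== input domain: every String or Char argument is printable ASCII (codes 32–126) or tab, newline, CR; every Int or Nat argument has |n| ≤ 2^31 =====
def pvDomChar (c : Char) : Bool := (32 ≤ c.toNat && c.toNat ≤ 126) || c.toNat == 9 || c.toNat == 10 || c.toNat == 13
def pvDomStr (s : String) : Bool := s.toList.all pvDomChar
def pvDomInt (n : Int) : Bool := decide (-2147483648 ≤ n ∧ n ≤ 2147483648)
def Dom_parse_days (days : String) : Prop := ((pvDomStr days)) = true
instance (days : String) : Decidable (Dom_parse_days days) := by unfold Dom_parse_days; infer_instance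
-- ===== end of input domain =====

-- B replaces A's dual-slice-and-concatenate range construction by a name→index dict and a
-- single modular-increment loop (objective: alternative; same cost).

-- ===== PORT A =====
def WEEKDAYS : List String := ["Mo", "Tu", "We", "Th", "Fr", "Sa", "Su"]

-- s.title() ported by hand (PySem has no title): uppercase a char after a non-letter,
-- lowercase after a letter — exact for ASCII strings (our domain).
def pyTitleGo : Bool → List Char → List Char
  | _, [] => []
  | prev, c :: cs => (if prev then c.toLower else c.toUpper) :: pyTitleGo c.isAlpha cs

def pyTitle (s : String) : String := String.ofList (pyTitleGo false s.toList)

def parse_days (days : String) : List String :=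
  if PySem.Str.isIn "-" days then
    let d := (PySem.Str.split? days "-").getD []   -- sep "-" ≠ "": split? is always some
    let r := d.map (fun i => PySem.Str.slice (PySem.Str.strip i) none (some 2))
    -- WEEKDAYS.index raises ValueError on an unknown day: none here, excluded by Pre_
    match PySem.List.index? WEEKDAYS (pyTitle (r.getD 0 "")),
          PySem.List.index? WEEKDAYS (pyTitle (r.getD 1 "")) with
    | some s, some e =>
        if s ≤ e then
          PySem.List.slice WEEKDAYS (some (s : Int)) (some ((e : Int) + 1))
        else
          PySem.List.slice WEEKDAYS (some (s : Int)) none ++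
            PySem.List.slice WEEKDAYS none (some ((e : Int) + 1))
    | _, _ => []
  else if PySem.Str.isIn "&" days then
    ((PySem.Str.split? days "&").getD []).map
      (fun i => pyTitle (PySem.Str.slice (PySem.Str.strip i) none (some 2)))
  else
    [pyTitle (PySem.Str.slice (PySem.Str.strip days) none (some 2))]

-- ===== PORT B =====
-- B's own module constants/helpers (B's Python defines its own WEEKDAYS, _IDX and _abbr)
def wdList : List String := ["Mo", "Tu", "We", "Th", "Fr", "Sa", "Su"]

def titleGoB : Bool → List Char → List Char
  | _, [] => []
  | prev, c :: cs => (if prev then c.toLower else c.toUpper) :: titleGoB c.isAlpha cs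

def titleB (s : String) : String := String.ofList (titleGoB false s.toList)

def dayAbbr (part : String) : String :=
  titleB (PySem.Str.slice (PySem.Str.strip part) none (some 2))

def IDX : PySem.Dict String Int :=
  (PySem.List.enumerate wdList 0).foldl (fun d p => d.insert p.2 p.1) PySem.Dict.empty

-- the 'while i != e' body: step i to (i+1) % 7, append WEEKDAYS[i]
def wdLoop : Nat → Int → Int → List String
  | 0, _, _ => []
  | f + 1, i, e =>
      if i = e then []
      else
        let i' := PySem.Int.mod (i + 1) 7
        PySem.List.pyGetD wdList i' "" :: wdLoop f i' e

def parse_days_alt (days : String) : List String :=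
  if PySem.Str.isIn "-" days then
    let parts := ((PySem.Str.split? days "-").getD []).map dayAbbr
    -- _IDX[...] raises KeyError on an unknown day: none here, excluded by Pre_
    match PySem.Dict.get? IDX (parts.getD 0 "") with
    | none => []
    | some i =>
      match PySem.Dict.get? IDX (parts.getD 1 "") with
      | none => []
      | some e => PySem.List.pyGetD wdList i "" :: wdLoop 7 i e
  else if PySem.Str.isIn "&" days then
    ((PySem.Str.split? days "&").getD []).map dayAbbr
  else
    [dayAbbr days]

-- ===== PRECONDITION & SPEC =====
-- Pre_ excludes exactly the inputs where A raises ValueError: a string containing '-' whose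
-- first or second '-'-piece, stripped and cut to its first two characters, is not one of the
-- 28 case-variant spellings of a weekday abbreviation (title-casing it then misses WEEKDAYS).
def pvSpellings : List String :=
  ["mo", "mO", "Mo", "MO", "tu", "tU", "Tu", "TU", "we", "wE", "We", "WE",
   "th", "tH", "Th", "TH", "fr", "fR", "Fr", "FR", "sa", "sA", "Sa", "SA",
   "su", "sU", "Su", "SU"]

def Pre_parse_days (days : String) : Prop :=
  PySem.Str.isIn "-" days = true →
    PySem.Str.slice (PySem.Str.strip (((PySem.Str.split? days "-").getD []).getD 0 ""))
        none (some 2) ∈ pvSpellings ∧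
      PySem.Str.slice (PySem.Str.strip (((PySem.Str.split? days "-").getD []).getD 1 ""))
        none (some 2) ∈ pvSpellings
instance (days : String) : Decidable (Pre_parse_days days) := by
  unfold Pre_parse_days; infer_instance

def pvWitness_parse_days : String := "Sat-Mon"

def Spec_parse_days (days : String) (out : List String) : Prop := out = parse_days_alt days
instance (days : String) (out : List String) : Decidable (Spec_parse_days days out) := by
  unfold Spec_parse_days; infer_instance

-- ===== CLAIM (what is proved, stated in full; the proofs are below) =====
def Claim_equal_parse_days : Prop :=
  ∀ (days : String), Dom_parse_days days → Pre_parse_days days →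
    Spec_parse_days days (parse_days days)

-- ===== LEMMAS AND PROOFS =====

-- A's and B's hand-written title helpers are the same function
theorem titleGoB_eq (cs : List Char) : ∀ b, titleGoB b cs = pyTitleGo b cs := by
  induction cs with
  | nil => intro b; rfl
  | cons c cs ih => intro b; simp [titleGoB, pyTitleGo, ih]

theorem titleB_eq (s : String) : titleB s = pyTitle s := by
  simp [titleB, pyTitle, titleGoB_eq]

-- title-casing any of the 28 accepted spellings lands in the weekday list
theorem spell_mem (y : String) (hy : y ∈ pvSpellings) : titleB y ∈ wdList := by
  fin_cases hy <;> decide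

-- A's key (title of the 2-prefix of the j-th raw piece) and B's key (j-th mapped piece)
-- are the same string, also when the piece is missing (both collapse to "").
theorem keyA_eq (d : List String) (j : Nat) :
    pyTitle ((d.map (fun i => PySem.Str.slice (PySem.Str.strip i) none (some 2))).getD j "")
      = dayAbbr (d.getD j "") := by
  rcases h : d[j]? with _ | x <;>
    simp [List.getD, h, dayAbbr, titleB_eq] <;> rfl

theorem keyB_eq (d : List String) (j : Nat) :
    (d.map dayAbbr).getD j "" = dayAbbr (d.getD j "") := by
  rcases h : d[j]? with _ | x <;> simp [List.getD, h, dayAbbr, titleB_eq] <;> rfl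

-- list.index and the dict lookup agree on every weekday, and give an index below 7
theorem idx_agree (k : String) (hk : k ∈ wdList) :
    ∃ n : Nat, n < 7 ∧ PySem.List.index? WEEKDAYS k = some n ∧
      PySem.Dict.get? IDX k = some (n : Int) := by
  fin_cases hk
  · exact ⟨0, by omega, by decide, by decide⟩
  · exact ⟨1, by omega, by decide, by decide⟩
  · exact ⟨2, by omega, by decide, by decide⟩
  · exact ⟨3, by omega, by decide, by decide⟩
  · exact ⟨4, by omega, by decide, by decide⟩
  · exact ⟨5, by omega, by decide, by decide⟩
  · exact ⟨6, by omega, by decide, by decide⟩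

-- the modular loop produces exactly A's slice/concat value, for all 49 index pairs
theorem loop_eq (s e : Nat) (hs : s < 7) (he : e < 7) :
    (if s ≤ e then
        PySem.List.slice WEEKDAYS (some (s : Int)) (some ((e : Int) + 1))
      else
        PySem.List.slice WEEKDAYS (some (s : Int)) none ++
          PySem.List.slice WEEKDAYS none (some ((e : Int) + 1)))
      = PySem.List.pyGetD wdList (s : Int) "" :: wdLoop 7 (s : Int) (e : Int) := by
  interval_cases s <;> interval_cases e <;> decide

-- ===== VERDICT (by name: the statement is the Claim_ definition above) =====
set_option maxHeartbeats 1000000 in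
theorem parse_days_spec : Claim_equal_parse_days := by
  intro days _ hpre
  unfold Spec_parse_days parse_days parse_days_alt
  by_cases hd : PySem.Str.isIn "-" days = true
  · obtain ⟨h0, h1⟩ := hpre hd
    have hk0 : dayAbbr (((PySem.Str.split? days "-").getD []).getD 0 "") ∈ wdList :=
      spell_mem _ h0
    have hk1 : dayAbbr (((PySem.Str.split? days "-").getD []).getD 1 "") ∈ wdList :=
      spell_mem _ h1
    obtain ⟨n0, hn0, hi0, hg0⟩ := idx_agree _ hk0
    obtain ⟨n1, hn1, hi1, hg1⟩ := idx_agree _ hk1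
    simp only [hd, if_true, keyA_eq, keyB_eq, hi0, hi1, hg0, hg1]
    exact loop_eq n0 n1 hn0 hn1
  · have hd' : PySem.Str.isIn "-" days = false := by simpa using hd
    simp only [hd', Bool.false_eq_true, if_false]
    by_cases ha : PySem.Str.isIn "&" days = true
    · simp only [ha, if_true]
      exact List.map_congr_left fun x _ => by simp [dayAbbr, titleB_eq]
    · have ha' : PySem.Str.isIn "&" days = false := by simpa using ha
      simp only [ha', Bool.false_eq_true, if_false]
      simp [dayAbbr, titleB_eq]
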